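-- pv_equiv track=rewrite | github.com/billzorn/titanic | describefloat.py | unicode_double_vertical_nl
-- ===== SOURCE A (Python) =====
-- topc = u'\u252c'
--
-- botc = u'\u2534'
--
-- vert = u'\u2502'
--
-- tic = u'\u253c'
--
-- hori = u'\u2500'
--
-- def unicode_double_vertical_nl(lines, start_idx, end_idx, lmid_idx = None,
--                                ltop = topc, rtop = topc, lbot = botc, rbot = botc):
--     lmax = len(lines) - 1
--     s = ''
--     for idx, line in enumerate(lines):
--         if idx == 0:
--             ll = ltop
--         elif idx == lmax:
--             ll = lbot
--         elif lmid_idx is not None and idx == lmid_idx: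
--             ll = tic
--         else:
--             ll = vert
--
--         if idx == start_idx:
--             if start_idx == end_idx:
--                 rl = hori
--             else:
--                 rl = rtop
--         elif start_idx < idx and idx < end_idx:
--             rl = vert
--         elif idx == end_idx:
--             rl = rbot
--         else:
--             rl = ' '
--
--         s += ' {} {}{}'.format(ll, rl, line)
--         if idx < lmax:
--             s += '\n'
--
--     return s
-- ===== SOURCE B (Python) =====
-- topc = u'\u252c'
-- botc = u'\u2534'
-- vert = u'\u2502'
-- tic = u'\u253c'
-- hori = u'\u2500'
--
-- def unicode_double_vertical_nl(lines, start_idx, end_idx, lmid_idx = None,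
--                                ltop = topc, rtop = topc, lbot = botc, rbot = botc):
--     n = len(lines)
--     # left decoration column: overwrite in reverse priority order
--     left = [vert] * n
--     if lmid_idx is not None and 0 <= lmid_idx < n:
--         left[lmid_idx] = tic
--     if n > 0:
--         left[n - 1] = lbot
--         left[0] = ltop
--     # right decoration column
--     right = [' '] * n
--     for i in range(max(start_idx + 1, 0), min(end_idx, n)):
--         right[i] = vert
--     if 0 <= end_idx < n:
--         right[end_idx] = rbot
--     if 0 <= start_idx < n:
--         right[start_idx] = hori if start_idx == end_idx else rtop
--     return '\n'.join(' {} {}{}'.format(l, r, line)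
--                      for line, l, r in zip(lines, left, right))
-- ===== Notes on version B (the rewrite author's own statement) =====
-- stated objective: alternative
-- what changed: B precomputes the two decoration columns as lists (vert-filled then overwritten in reverse priority: lmid/lbot/ltop on the left; the open (start,end) interval, end, start on the right) and joins the zipped rows with '\n', instead of A's per-line branch chains and conditional newline appends.
import Mathlib
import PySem

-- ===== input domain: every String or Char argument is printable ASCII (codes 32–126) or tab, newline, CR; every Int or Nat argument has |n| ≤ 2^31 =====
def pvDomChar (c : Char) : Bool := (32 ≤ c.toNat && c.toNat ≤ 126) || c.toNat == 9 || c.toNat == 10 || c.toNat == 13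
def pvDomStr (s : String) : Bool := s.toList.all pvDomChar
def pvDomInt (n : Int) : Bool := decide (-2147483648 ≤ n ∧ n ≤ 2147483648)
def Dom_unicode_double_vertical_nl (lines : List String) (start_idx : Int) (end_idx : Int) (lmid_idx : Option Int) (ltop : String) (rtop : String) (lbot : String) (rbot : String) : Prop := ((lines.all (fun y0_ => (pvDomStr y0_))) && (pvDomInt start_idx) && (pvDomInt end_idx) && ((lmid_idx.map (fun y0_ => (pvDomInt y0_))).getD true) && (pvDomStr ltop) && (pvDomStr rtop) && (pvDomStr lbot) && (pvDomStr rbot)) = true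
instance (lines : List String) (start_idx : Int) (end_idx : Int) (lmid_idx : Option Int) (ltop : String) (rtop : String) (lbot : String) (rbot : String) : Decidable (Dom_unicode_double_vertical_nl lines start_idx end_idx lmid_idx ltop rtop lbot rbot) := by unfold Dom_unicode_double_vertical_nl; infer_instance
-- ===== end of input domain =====

-- B builds the two decoration columns as lists (overwritten in reverse priority order) and
-- joins the zipped rows with '\n', instead of A's per-line branch chains (objective: alternative).

-- module constants shared by both Pythons
def pvTic : String := "┼"
def pvVertG : String := "│"
def pvHoriG : String := "─"

-- ===== PORT A =====
-- literal transliteration of A: one fold over enumerate(lines), per-line branch chains,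
-- conditional '\n' append ('lmid_idx is not None and idx == lmid_idx' is 'lmid_idx = some idx')
def unicode_double_vertical_nl (lines : List String) (start_idx : Int) (end_idx : Int) (lmid_idx : Option Int) (ltop : String) (rtop : String) (lbot : String) (rbot : String) : String :=
  let lmax : Int := (lines.length : Int) - 1
  (PySem.List.enumerate lines).foldl
    (fun s p =>
      let idx := p.1
      let line := p.2
      let ll : String :=
        if idx = 0 then ltop
        else if idx = lmax then lbot
        else if lmid_idx = some idx then pvTic
        else pvVertG
      let rl : String :=
        if idx = start_idx then (if start_idx = end_idx then pvHoriG else rtop)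
        else if start_idx < idx ∧ idx < end_idx then pvVertG
        else if idx = end_idx then rbot
        else " "
      (s ++ (" " ++ ll ++ " " ++ rl ++ line)) ++ (if idx < lmax then "\n" else ""))
    ""

-- ===== PORT B =====
-- literal transliteration of B (Source B): build left/right glyph columns, then join zipped rows
def unicode_double_vertical_nl_alt (lines : List String) (start_idx : Int) (end_idx : Int) (lmid_idx : Option Int) (ltop : String) (rtop : String) (lbot : String) (rbot : String) : String :=
  let n := lines.length
  let left0 := List.replicate n pvVertG
  let left1 :=
    match lmid_idx with
    | some m => if 0 ≤ m ∧ m < (n : Int) then left0.set m.toNat pvTic else left0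
    | none => left0
  let left := if 0 < n then (left1.set (n - 1) lbot).set 0 ltop else left1
  let right0 := List.replicate n " "
  let right1 := (PySem.List.pyRange (max (start_idx + 1) 0) (min end_idx (n : Int)) 1).foldl
      (fun r i => PySem.List.pySetD r i pvVertG) right0
  let right2 := if 0 ≤ end_idx ∧ end_idx < (n : Int) then right1.set end_idx.toNat rbot else right1
  let right := if 0 ≤ start_idx ∧ start_idx < (n : Int) then
      right2.set start_idx.toNat (if start_idx = end_idx then pvHoriG else rtop) else right2
  PySem.Str.join "\n"
    ((lines.zip (left.zip right)).map (fun p => " " ++ p.2.1 ++ " " ++ p.2.2 ++ p.1))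

-- ===== PRECONDITION & SPEC =====
def Spec_unicode_double_vertical_nl (lines : List String) (start_idx : Int) (end_idx : Int) (lmid_idx : Option Int) (ltop : String) (rtop : String) (lbot : String) (rbot : String) (out : String) : Prop := out = unicode_double_vertical_nl_alt lines start_idx end_idx lmid_idx ltop rtop lbot rbot
instance (lines : List String) (start_idx : Int) (end_idx : Int) (lmid_idx : Option Int) (ltop : String) (rtop : String) (lbot : String) (rbot : String) (out : String) : Decidable (Spec_unicode_double_vertical_nl lines start_idx end_idx lmid_idx ltop rtop lbot rbot out) := by unfold Spec_unicode_double_vertical_nl; infer_instance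

-- ===== CLAIM (what is proved, stated in full; the proofs are below) =====
def Claim_equal_unicode_double_vertical_nl : Prop := ∀ (lines : List String) (start_idx : Int) (end_idx : Int) (lmid_idx : Option Int) (ltop : String) (rtop : String) (lbot : String) (rbot : String), Dom_unicode_double_vertical_nl lines start_idx end_idx lmid_idx ltop rtop lbot rbot → Spec_unicode_double_vertical_nl lines start_idx end_idx lmid_idx ltop rtop lbot rbot (unicode_double_vertical_nl lines start_idx end_idx lmid_idx ltop rtop lbot rbot)

-- ===== LEMMAS AND PROOFS =====

-- String-level wrappers of the cited PySem.Chars.join_* lemmas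
theorem str_join_nil (sep : String) : PySem.Str.join sep [] = "" := by
  apply String.toList_inj.mp
  simp [PySem.Str.toList_join, PySem.Chars.join_nil]

theorem str_join_singleton (sep p : String) : PySem.Str.join sep [p] = p := by
  apply String.toList_inj.mp
  simp [PySem.Str.toList_join, PySem.Chars.join_singleton]

theorem str_join_cons_cons (sep p q : String) (rest : List String) :
    PySem.Str.join sep (p :: q :: rest) = p ++ sep ++ PySem.Str.join sep (q :: rest) := by
  apply String.toList_inj.mp
  simp [PySem.Str.toList_join, PySem.Chars.join_cons_cons]

-- A's fold with a general accumulator vs. the empty accumulator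
theorem foldl_enumerate_row {α : Type} (F : Int → α → String) (G : Int → String) :
    ∀ (rest : List α) (k : Int) (s : String),
      (PySem.List.enumerate rest k).foldl (fun s p => (s ++ F p.1 p.2) ++ G p.1) s
        = s ++ (PySem.List.enumerate rest k).foldl (fun s p => (s ++ F p.1 p.2) ++ G p.1) "" := by
  intro rest
  induction rest with
  | nil => intro k s; simp [PySem.List.enumerate_nil]
  | cons x t ih =>
    intro k s
    simp only [PySem.List.enumerate_cons, List.foldl_cons]
    rw [ih (k+1) ((s ++ F k x) ++ G k), ih (k+1) ((("" : String) ++ F k x) ++ G k)]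
    simp [String.append_assoc]

-- A's whole fold is the newline-join of its rows (indices running to the last line)
theorem chunk_eq_join {α : Type} (F : Int → α → String) (lmax : Int) :
    ∀ (rest : List α) (k : Int), k + rest.length = lmax + 1 →
      (PySem.List.enumerate rest k).foldl
        (fun s p => (s ++ F p.1 p.2) ++ (if p.1 < lmax then "\n" else "")) ""
        = PySem.Str.join "\n" ((PySem.List.enumerate rest k).map (fun p => F p.1 p.2)) := by
  intro rest
  induction rest with
  | nil => intro k hk; simp [PySem.List.enumerate_nil, str_join_nil]
  | cons x t ih =>
    intro k hk
    simp only [PySem.List.enumerate_cons, List.foldl_cons, List.map_cons]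
    rw [foldl_enumerate_row F (fun j => if j < lmax then "\n" else "") t (k+1)]
    cases t with
    | nil =>
      have hk' : k = lmax := by simp at hk; omega
      simp [PySem.List.enumerate_nil, str_join_singleton, hk']
    | cons y t2 =>
      have hklt : k < lmax := by simp at hk; omega
      rw [ih (k+1) (by simp at hk ⊢; omega)]
      simp only [PySem.List.enumerate_cons, List.map_cons] at *
      rw [str_join_cons_cons]
      simp [hklt, String.append_assoc]

-- B's left column, named for the proofs (definitionally the column built inside the port of B)
def leftCol (n : Nat) (lmid_idx : Option Int) (ltop lbot : String) : List String :=
  let left0 := List.replicate n pvVertG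
  let left1 :=
    match lmid_idx with
    | some m => if 0 ≤ m ∧ m < (n : Int) then left0.set m.toNat pvTic else left0
    | none => left0
  if 0 < n then (left1.set (n - 1) lbot).set 0 ltop else left1

theorem length_leftCol (n : Nat) (lmid_idx : Option Int) (ltop lbot : String) :
    (leftCol n lmid_idx ltop lbot).length = n := by
  unfold leftCol
  cases lmid_idx <;> simp only [] <;> split_ifs <;> simp

theorem getElem?_leftCol (n : Nat) (lmid_idx : Option Int) (ltop lbot : String) (i : Nat) (h : i < n) :
    (leftCol n lmid_idx ltop lbot)[i]? =
      some (if (i : Int) = 0 then ltop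
        else if (i : Int) = (n : Int) - 1 then lbot
        else if lmid_idx = some (i : Int) then pvTic
        else pvVertG) := by
  unfold leftCol
  cases lmid_idx with
  | none =>
    simp only []
    rw [if_pos (by omega)]
    simp only [List.getElem?_set, List.length_set, List.length_replicate, List.getElem?_replicate]
    split_ifs <;> simp_all <;> omega
  | some m =>
    simp only []
    rw [if_pos (by omega)]
    by_cases hm : 0 ≤ m ∧ m < (n : Int)
    · rw [if_pos hm]
      simp only [List.getElem?_set, List.length_set, List.length_replicate, List.getElem?_replicate]
      split_ifs <;> simp_all <;> omega
    · rw [if_neg hm]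
      simp only [List.getElem?_set, List.length_set, List.length_replicate, List.getElem?_replicate]
      split_ifs <;> simp_all <;> omega

-- length of the interval-overwrite fold
theorem length_foldl_pySetD {α : Type} (v : α) (l : List Int) (r : List α) :
    (l.foldl (fun r j => PySem.List.pySetD r j v) r).length = r.length := by
  induction l generalizing r with
  | nil => rfl
  | cons a t ih => simp [List.foldl_cons, ih, PySem.List.length_pySetD]

-- element of the interval-overwrite fold
theorem getElem?_foldl_pySetD {α : Type} (v : α) :
    ∀ (a b : Int), 0 ≤ a → ∀ (r : List α) (i : Nat),
      ((PySem.List.pyRange a b 1).foldl (fun r j => PySem.List.pySetD r j v) r)[i]?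
        = if a ≤ (i : Int) ∧ (i : Int) < b ∧ i < r.length then some v else r[i]? := by
  intro a b
  by_cases hab : b ≤ a
  · intro ha r i
    rw [PySem.List.pyRange_one_eq_nil hab]
    simp only [List.foldl_nil]
    rw [if_neg (by omega)]
  · intro ha r i
    have h : ∀ (m : Nat) (a : Int), 0 ≤ a → (b - a).toNat = m → ∀ (r : List α),
        ((PySem.List.pyRange a b 1).foldl (fun r j => PySem.List.pySetD r j v) r)[i]?
          = if a ≤ (i : Int) ∧ (i : Int) < b ∧ i < r.length then some v else r[i]? := by
      intro m
      induction m with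
      | zero =>
        intro a ha hm r
        rw [PySem.List.pyRange_one_eq_nil (by omega)]
        simp only [List.foldl_nil]
        rw [if_neg (by omega)]
      | succ m ih =>
        intro a ha hm r
        rw [PySem.List.pyRange_one_cons (by omega), List.foldl_cons]
        rw [ih (a+1) (by omega) (by omega)]
        simp only [PySem.List.pySetD_of_nonneg r v ha, List.length_set, List.getElem?_set]
        by_cases h1 : (a+1) ≤ (i:Int) ∧ (i:Int) < b ∧ i < r.length
        · rw [if_pos h1, if_pos (by omega)]
        · rw [if_neg h1]
          by_cases h2 : a.toNat = i
          · by_cases h3 : a.toNat < r.length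
            · rw [if_pos h2, if_pos h3, if_pos (by omega)]
            · rw [if_pos h2, if_neg h3, if_neg (by omega)]
              rw [List.getElem?_eq_none (by omega)]
          · rw [if_neg h2, if_neg (by omega)]
    exact h (b - a).toNat a ha rfl r

-- B's right column, named for the proofs (definitionally the column built inside the port of B)
def rightCol (n : Nat) (start_idx end_idx : Int) (rtop rbot : String) : List String :=
  let right0 := List.replicate n " "
  let right1 := (PySem.List.pyRange (max (start_idx + 1) 0) (min end_idx (n : Int)) 1).foldl
      (fun r i => PySem.List.pySetD r i pvVertG) right0
  let right2 := if 0 ≤ end_idx ∧ end_idx < (n : Int) then right1.set end_idx.toNat rbot else right1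
  if 0 ≤ start_idx ∧ start_idx < (n : Int) then
      right2.set start_idx.toNat (if start_idx = end_idx then pvHoriG else rtop) else right2

theorem length_rightCol (n : Nat) (start_idx end_idx : Int) (rtop rbot : String) :
    (rightCol n start_idx end_idx rtop rbot).length = n := by
  unfold rightCol
  split_ifs <;> simp [length_foldl_pySetD]

theorem getElem?_rightCol (n : Nat) (start_idx end_idx : Int) (rtop rbot : String) (i : Nat) (h : i < n) :
    (rightCol n start_idx end_idx rtop rbot)[i]? =
      some (if (i : Int) = start_idx then (if start_idx = end_idx then pvHoriG else rtop)
        else if start_idx < (i : Int) ∧ (i : Int) < end_idx then pvVertG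
        else if (i : Int) = end_idx then rbot
        else " ") := by
  unfold rightCol
  simp only []
  have h1 : ((PySem.List.pyRange (max (start_idx + 1) 0) (min end_idx (n : Int)) 1).foldl
      (fun r i => PySem.List.pySetD r i pvVertG) (List.replicate n " "))[i]?
      = some (if start_idx < (i : Int) ∧ (i : Int) < end_idx then pvVertG else " ") := by
    rw [getElem?_foldl_pySetD pvVertG _ _ (le_max_right _ _)]
    by_cases hc : start_idx < (i : Int) ∧ (i : Int) < end_idx
    · rw [if_pos ⟨by rw [max_le_iff]; omega, by rw [lt_min_iff]; exact ⟨by omega, by omega⟩,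
        by simpa using h⟩, if_pos hc]
    · rw [if_neg (by rw [max_le_iff, lt_min_iff]; omega), if_neg hc]
      rw [List.getElem?_replicate, if_pos h]
  have hlen2 : (if 0 ≤ end_idx ∧ end_idx < (n : Int) then
      ((PySem.List.pyRange (max (start_idx + 1) 0) (min end_idx (n : Int)) 1).foldl
        (fun r i => PySem.List.pySetD r i pvVertG) (List.replicate n " ")).set end_idx.toNat rbot
      else (PySem.List.pyRange (max (start_idx + 1) 0) (min end_idx (n : Int)) 1).foldl
        (fun r i => PySem.List.pySetD r i pvVertG) (List.replicate n " ")).length = n := by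
    split_ifs <;> simp [length_foldl_pySetD]
  have h2 : (if 0 ≤ end_idx ∧ end_idx < (n : Int) then
      ((PySem.List.pyRange (max (start_idx + 1) 0) (min end_idx (n : Int)) 1).foldl
        (fun r i => PySem.List.pySetD r i pvVertG) (List.replicate n " ")).set end_idx.toNat rbot
      else (PySem.List.pyRange (max (start_idx + 1) 0) (min end_idx (n : Int)) 1).foldl
        (fun r i => PySem.List.pySetD r i pvVertG) (List.replicate n " "))[i]?
      = some (if start_idx < (i : Int) ∧ (i : Int) < end_idx then pvVertG
          else if (i : Int) = end_idx then rbot else " ") := by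
    by_cases he : 0 ≤ end_idx ∧ end_idx < (n : Int)
    · rw [if_pos he, List.getElem?_set]
      by_cases hei : end_idx.toNat = i
      · rw [if_pos hei, if_pos (by rw [length_foldl_pySetD]; simp only [List.length_replicate]; omega)]
        rw [if_neg (by omega), if_pos (by omega)]
      · rw [if_neg hei, h1]
        by_cases hc : start_idx < (i : Int) ∧ (i : Int) < end_idx
        · rw [if_pos hc, if_pos hc]
        · rw [if_neg hc, if_neg hc, if_neg (by omega)]
    · rw [if_neg he, h1]
      by_cases hc : start_idx < (i : Int) ∧ (i : Int) < end_idx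
      · rw [if_pos hc, if_pos hc]
      · rw [if_neg hc, if_neg hc, if_neg (by omega)]
  by_cases hs : 0 ≤ start_idx ∧ start_idx < (n : Int)
  · rw [if_pos hs, List.getElem?_set]
    by_cases hsi : start_idx.toNat = i
    · rw [if_pos hsi, if_pos (by rw [hlen2]; omega),
        if_pos (show (i : Int) = start_idx by omega)]
    · rw [if_neg hsi, h2, if_neg (show ¬((i : Int) = start_idx) by omega)]
  · rw [if_neg hs, h2, if_neg (show ¬((i : Int) = start_idx) by omega)]

-- ===== VERDICT (by name: the statement is the Claim_ definition above) =====
theorem unicode_double_vertical_nl_spec : Claim_equal_unicode_double_vertical_nl := by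
  unfold Claim_equal_unicode_double_vertical_nl Spec_unicode_double_vertical_nl
  intro lines start_idx end_idx lmid_idx ltop rtop lbot rbot _dom
  have hA : unicode_double_vertical_nl lines start_idx end_idx lmid_idx ltop rtop lbot rbot
      = PySem.Str.join "\n" ((PySem.List.enumerate lines 0).map (fun p =>
          " " ++ (if p.1 = 0 then ltop
            else if p.1 = (lines.length : Int) - 1 then lbot
            else if lmid_idx = some p.1 then pvTic
            else pvVertG)
          ++ " " ++ (if p.1 = start_idx then (if start_idx = end_idx then pvHoriG else rtop)
            else if start_idx < p.1 ∧ p.1 < end_idx then pvVertG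
            else if p.1 = end_idx then rbot
            else " ") ++ p.2)) := by
    exact chunk_eq_join
      (fun idx line =>
        " " ++ (if idx = 0 then ltop
          else if idx = (lines.length : Int) - 1 then lbot
          else if lmid_idx = some idx then pvTic
          else pvVertG)
        ++ " " ++ (if idx = start_idx then (if start_idx = end_idx then pvHoriG else rtop)
          else if start_idx < idx ∧ idx < end_idx then pvVertG
          else if idx = end_idx then rbot
          else " ") ++ line)
      ((lines.length : Int) - 1) lines 0 (by omega)
  have hB : unicode_double_vertical_nl_alt lines start_idx end_idx lmid_idx ltop rtop lbot rbot
      = PySem.Str.join "\n"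
          ((lines.zip ((leftCol lines.length lmid_idx ltop lbot).zip
              (rightCol lines.length start_idx end_idx rtop rbot))).map
            (fun p => " " ++ p.2.1 ++ " " ++ p.2.2 ++ p.1)) := rfl
  rw [hA, hB]
  congr 1
  apply List.ext_getElem
  · simp [PySem.List.length_enumerate, length_leftCol, length_rightCol]
  · intro i h1 h2
    have hi : i < lines.length := by
      simpa [PySem.List.length_enumerate] using h1
    rw [List.getElem_map, List.getElem_map, PySem.List.getElem_enumerate,
      List.getElem_zip, List.getElem_zip]
    have hl : (leftCol lines.length lmid_idx ltop lbot)[i]'(by rw [length_leftCol]; exact hi)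
        = (if (i : Int) = 0 then ltop
          else if (i : Int) = (lines.length : Int) - 1 then lbot
          else if lmid_idx = some (i : Int) then pvTic
          else pvVertG) := by
      apply Option.some.inj
      rw [← List.getElem?_eq_getElem, getElem?_leftCol _ _ _ _ _ hi]
    have hr : (rightCol lines.length start_idx end_idx rtop rbot)[i]'(by rw [length_rightCol]; exact hi)
        = (if (i : Int) = start_idx then (if start_idx = end_idx then pvHoriG else rtop)
          else if start_idx < (i : Int) ∧ (i : Int) < end_idx then pvVertG
          else if (i : Int) = end_idx then rbot
          else " ") := by
      apply Option.some.inj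
      rw [← List.getElem?_eq_getElem, getElem?_rightCol _ _ _ _ _ _ hi]
    simp only [zero_add, hl, hr]
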